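-- pv_equiv track=rewrite | github.com/MarcelGuim/EPSCUS | routePreparator.py | get_next_valid_edge
-- ===== SOURCE A (Python) =====
-- def get_next_valid_edge(currentEdge, edges):
--     if "#" in currentEdge and not currentEdge.startswith(":") and "cluster" not in currentEdge:
--         index = edges.index(currentEdge)
--         if index == len(edges) - 1:
--             return None
--         next_edge = edges[index + 1]
--         while "#" not in next_edge:
--             index += 1
--             if index == len(edges):
--                 return None
--             next_edge = edges[index]
--         return next_edge
--     else:
--         return None
-- ===== SOURCE B (Python) =====
-- def get_next_valid_edge(currentEdge, edges):
--     if "#" not in currentEdge or currentEdge.startswith(":") or "cluster" in currentEdge: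
--         return None
--     # Backward pass: precompute, for every edge, the first '#'-edge that follows
--     # its FIRST occurrence (later overwrites win, so earlier occurrences take
--     # precedence), then answer with one dictionary lookup.
--     nxt = {}
--     follow = None
--     for edge in reversed(edges):
--         nxt[edge] = follow
--         if "#" in edge:
--             follow = edge
--     return nxt[currentEdge]
-- ===== Notes on version B (the rewrite author's own statement) =====
-- stated objective: alternative
-- what changed: A locates currentEdge with edges.index and then walks forward by index until an edge containing '#'; B instead makes one backward pass that precomputes a dictionary mapping every edge to the first '#'-edge after its first occurrence, and answers with a single lookup.
import Mathlib
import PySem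

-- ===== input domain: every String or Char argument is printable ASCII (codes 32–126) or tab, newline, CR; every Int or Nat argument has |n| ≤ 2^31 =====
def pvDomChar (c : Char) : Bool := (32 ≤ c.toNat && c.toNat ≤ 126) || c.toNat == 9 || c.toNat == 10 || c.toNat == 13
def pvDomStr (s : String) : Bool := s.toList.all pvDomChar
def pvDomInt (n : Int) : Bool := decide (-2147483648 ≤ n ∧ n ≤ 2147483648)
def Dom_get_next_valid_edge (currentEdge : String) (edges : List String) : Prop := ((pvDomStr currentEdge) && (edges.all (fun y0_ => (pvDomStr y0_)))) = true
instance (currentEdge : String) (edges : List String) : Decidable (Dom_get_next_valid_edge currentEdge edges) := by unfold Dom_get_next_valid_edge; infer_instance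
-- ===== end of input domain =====

-- B replaces A's index-lookup plus forward index walk by a backward pass that
-- precomputes a dictionary (edge -> first '#'-edge after its first occurrence)
-- followed by one lookup (objective: alternative; same linear cost).
-- Where A raises ValueError (currentEdge absent while the guard holds), B raises KeyError; excluded by Pre_.

-- ===== PORT A =====
-- the while loop of A: state (index, next_edge); fuel bounds the iterations (≤ edges.length)
def pvWhileA (edges : List String) : Nat → Nat → String → Option String
  | 0, _, _ => none
  | fuel + 1, index, next_edge =>
    if PySem.Str.isIn "#" next_edge then some next_edge
    else if index + 1 = edges.length then none
    else pvWhileA edges fuel (index + 1) (edges.getD (index + 1) "")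

def get_next_valid_edge (currentEdge : String) (edges : List String) : Option String :=
  if PySem.Str.isIn "#" currentEdge && !(PySem.Str.startswith currentEdge ":") && !(PySem.Str.isIn "cluster" currentEdge) then
    match PySem.List.index? edges currentEdge with
    | none => none  -- Python raises ValueError here; excluded by Pre_
    | some index =>
      if index = edges.length - 1 then none
      else pvWhileA edges edges.length index (edges.getD (index + 1) "")
  else none

-- ===== PORT B =====
-- one step of B's backward loop: state (nxt, follow)
def pvStepB (st : PySem.Dict String (Option String) × Option String) (edge : String) :
    PySem.Dict String (Option String) × Option String :=
  (st.1.insert edge st.2, if PySem.Str.isIn "#" edge then some edge else st.2)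

def get_next_valid_edge_alt (currentEdge : String) (edges : List String) : Option String :=
  if !(PySem.Str.isIn "#" currentEdge) || PySem.Str.startswith currentEdge ":" || PySem.Str.isIn "cluster" currentEdge then none
  else
    let st := edges.reverse.foldl pvStepB (PySem.Dict.empty, none)
    match st.1.get? currentEdge with
    | some v => v
    | none => none  -- Python raises KeyError here; excluded by Pre_

-- ===== PRECONDITION & SPEC =====
-- Pre_ excludes exactly the inputs on which A raises ValueError: the guard holds but currentEdge is not in edges.
def Pre_get_next_valid_edge (currentEdge : String) (edges : List String) : Prop :=
  (PySem.Str.isIn "#" currentEdge && !(PySem.Str.startswith currentEdge ":") && !(PySem.Str.isIn "cluster" currentEdge)) = true → currentEdge ∈ edges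
instance (currentEdge : String) (edges : List String) : Decidable (Pre_get_next_valid_edge currentEdge edges) := by unfold Pre_get_next_valid_edge; infer_instance

def pvWitness_get_next_valid_edge : String × List String := ("a#", ["a#", "b", "c#"])

def Spec_get_next_valid_edge (currentEdge : String) (edges : List String) (out : Option String) : Prop := out = get_next_valid_edge_alt currentEdge edges
instance (currentEdge : String) (edges : List String) (out : Option String) : Decidable (Spec_get_next_valid_edge currentEdge edges out) := by unfold Spec_get_next_valid_edge; infer_instance

-- ===== CLAIM (what is proved, stated in full; the proofs are below) =====
def Claim_equal_get_next_valid_edge : Prop := ∀ (currentEdge : String) (edges : List String), Dom_get_next_valid_edge currentEdge edges → Pre_get_next_valid_edge currentEdge edges → Spec_get_next_valid_edge currentEdge edges (get_next_valid_edge currentEdge edges)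

-- ===== LEMMAS AND PROOFS =====

-- A's while loop finds the first '#'-edge among next_edge then edges[index+1:]
theorem pvWhileA_eq (edges : List String) :
    ∀ (fuel index : Nat) (next_edge : String),
      edges.length ≤ fuel + index → index < edges.length →
      pvWhileA edges fuel index next_edge =
        if PySem.Str.isIn "#" next_edge then some next_edge
        else (edges.drop (index + 1)).find? (fun e => PySem.Str.isIn "#" e) := by
  intro fuel
  induction fuel with
  | zero => intro index next_edge h1 h2; omega
  | succ f ih =>
    intro index next_edge h1 h2
    unfold pvWhileA
    by_cases hsh : PySem.Str.isIn "#" next_edge = true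
    · rw [if_pos hsh, if_pos hsh]
    · rw [if_neg hsh, if_neg hsh]
      by_cases hend : index + 1 = edges.length
      · rw [if_pos hend, List.drop_eq_nil_of_le (by omega), List.find?_nil]
      · have hlt : index + 1 < edges.length := by omega
        rw [if_neg hend, ih (index + 1) _ (by omega) hlt,
            List.getD_eq_getElem _ _ hlt,
            List.drop_eq_getElem_cons hlt, List.find?_cons]
        by_cases h : PySem.Str.isIn "#" edges[index + 1] = true
        · rw [if_pos h]; simp at h; simp [h]
        · rw [if_neg h]
          simp at h; simp [h]

-- B's backward loop, rephrased forward: foldl over the reverse is a foldr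
theorem pvBuildB_eq_foldr (edges : List String) :
    edges.reverse.foldl pvStepB (PySem.Dict.empty, none) =
      edges.foldr (fun e st => pvStepB st e) (PySem.Dict.empty, none) := by
  rw [List.foldl_reverse]

-- the 'follow' component is the first '#'-edge of the list
theorem pvBuildB_snd (l : List String) :
    (l.foldr (fun e st => pvStepB st e) (PySem.Dict.empty, none)).2 =
      l.find? (fun e => PySem.Str.isIn "#" e) := by
  induction l with
  | nil => rfl
  | cons e rest ih =>
    rw [List.foldr_cons, List.find?_cons]
    show (if PySem.Chars.isIn ['#'] e.toList then some e else _) = _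
    by_cases h : PySem.Chars.isIn ['#'] e.toList = true
    · simp [h]
    · simp at h; simp [PySem.Str.isIn, h, ih]

-- the dictionary at cur is the first '#'-edge after cur's FIRST occurrence
theorem pvBuildB_get? (cur : String) :
    ∀ (pre suf : List String), cur ∉ pre →
      ((pre ++ cur :: suf).foldr (fun e st => pvStepB st e) (PySem.Dict.empty, none)).1.get? cur =
        some (suf.find? (fun e => PySem.Str.isIn "#" e)) := by
  intro pre
  induction pre with
  | nil =>
    intro suf _
    rw [List.nil_append, List.foldr_cons]
    show ((_ : PySem.Dict String (Option String)).insert cur _).get? cur = _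
    rw [PySem.Dict.get?_insert_self, pvBuildB_snd]
  | cons e p ih =>
    intro suf hmem
    have hne : cur ≠ e := fun h => hmem (by simp [h])
    have hp : cur ∉ p := fun h => hmem (List.mem_cons_of_mem _ h)
    rw [List.cons_append, List.foldr_cons]
    show ((_ : PySem.Dict String (Option String)).insert e _).get? cur = _
    rw [PySem.Dict.get?_insert_of_ne _ _ hne, ih suf hp]

-- ===== VERDICT (by name: the statement is the Claim_ definition above) =====
theorem get_next_valid_edge_spec : Claim_equal_get_next_valid_edge := by
  intro cur edges _ hpre
  unfold Pre_get_next_valid_edge at hpre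
  unfold Spec_get_next_valid_edge get_next_valid_edge get_next_valid_edge_alt
  by_cases hg : (PySem.Str.isIn "#" cur && !(PySem.Str.startswith cur ":") && !(PySem.Str.isIn "cluster" cur)) = true
  · -- guard holds
    have hmem : cur ∈ edges := hpre hg
    have hg' := hg
    simp at hg'
    rw [if_pos hg, if_neg (by simp [hg'.1.1, hg'.1.2, hg'.2])]
    obtain ⟨k, hk⟩ := Option.isSome_iff_exists.mp ((PySem.List.index?_isSome_iff edges cur).mpr hmem)
    obtain ⟨pre, suf, hsplit, hklen, hnotpre⟩ := (PySem.List.index?_eq_some_iff edges cur k).mp hk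
    rw [hk]
    dsimp only
    -- B side
    have hB : ((edges.reverse.foldl pvStepB (PySem.Dict.empty, none)).1.get? cur) =
        some (suf.find? (fun e => PySem.Str.isIn "#" e)) := by
      rw [pvBuildB_eq_foldr, hsplit, pvBuildB_get? cur pre suf hnotpre]
    rw [hB]
    dsimp only
    have hklt : k < edges.length := by
      rw [hsplit, List.length_append, List.length_cons]; omega
    have hdropk : edges.drop (k + 1) = suf := by
      have h2 : edges.drop (pre.length + 1) = suf := by
        rw [hsplit, show pre ++ cur :: suf = (pre ++ [cur]) ++ suf by simp]
        exact List.drop_left' (by simp)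
      rwa [hklen] at h2
    by_cases hlast : k = edges.length - 1
    · -- last element: suf = []
      have hsuf : suf = [] := by
        have hlen : edges.length = pre.length + suf.length + 1 := by
          rw [hsplit]; simp only [List.length_append, List.length_cons]; omega
        have h0 : suf.length = 0 := by omega
        exact List.eq_nil_of_length_eq_zero h0
      simp [hlast, hsuf]
    · have hk1 : k + 1 < edges.length := by omega
      rw [if_neg hlast]
      rw [pvWhileA_eq edges edges.length k _ (by omega) hklt,
          List.getD_eq_getElem _ _ hk1, ← hdropk,
          List.drop_eq_getElem_cons hk1, List.find?_cons]
      by_cases h : PySem.Str.isIn "#" edges[k + 1] = true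
      · rw [if_pos h]; simp at h; simp [h]
      · rw [if_neg h]
  · -- guard false: both none
    have hBg : (!(PySem.Str.isIn "#" cur) || PySem.Str.startswith cur ":" || PySem.Str.isIn "cluster" cur) = true := by
      rcases Bool.eq_false_or_eq_true (PySem.Str.isIn "#" cur) with hx | hx <;>
        rcases Bool.eq_false_or_eq_true (PySem.Str.startswith cur ":") with hy | hy <;>
          rcases Bool.eq_false_or_eq_true (PySem.Str.isIn "cluster" cur) with hz | hz <;>
            simp_all
    rw [if_neg hg, if_pos hBg]
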